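-- pv_equiv track=rewrite | github.com/santealtamura97/Mazzei-Greek_Latin_POS_Tagger | test_baseline.py | baseline_algorithm
-- ===== SOURCE A (Python) =====
-- def baseline_algorithm(sentence_tokens,count_words_tag,possible_tags):
--     tags = []
--     for word in sentence_tokens:
--         tag_max = 'NOUN'
--         count_max_tag = 0
--         for tag in possible_tags:
--             if count_words_tag.get((word,tag),0) > count_max_tag:
--                 count_max_tag = count_words_tag[word,tag]
--                 tag_max = tag
--         tags.append(tag_max)
--     return tags
-- ===== SOURCE B (Python) =====
-- def baseline_algorithm(sentence_tokens, count_words_tag, possible_tags):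
--     idx = {}
--     for i, tag in enumerate(possible_tags):
--         if tag not in idx:
--             idx[tag] = i
--     best = {}  # word -> (count, first index in possible_tags, tag)
--     for (word, tag), count in count_words_tag.items():
--         i = idx.get(tag)
--         if i is not None and count > 0:
--             cur = best.get(word)
--             if cur is None or count > cur[0] or (count == cur[0] and i < cur[1]):
--                 best[word] = (count, i, tag)
--     return [best[word][2] if word in best else 'NOUN' for word in sentence_tokens]
-- ===== Notes on version B (the rewrite author's own statement) =====
-- stated objective: faster
-- what changed: Instead of scanning all possible_tags for every word with a dict lookup per (word,tag), B makes one pass over count_words_tag building a word->best-tag map (max count, ties broken by first index in possible_tags, via a precomputed tag->index map), then answers each token with an O(1) lookup defaulting to 'NOUN'.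
import Mathlib
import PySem

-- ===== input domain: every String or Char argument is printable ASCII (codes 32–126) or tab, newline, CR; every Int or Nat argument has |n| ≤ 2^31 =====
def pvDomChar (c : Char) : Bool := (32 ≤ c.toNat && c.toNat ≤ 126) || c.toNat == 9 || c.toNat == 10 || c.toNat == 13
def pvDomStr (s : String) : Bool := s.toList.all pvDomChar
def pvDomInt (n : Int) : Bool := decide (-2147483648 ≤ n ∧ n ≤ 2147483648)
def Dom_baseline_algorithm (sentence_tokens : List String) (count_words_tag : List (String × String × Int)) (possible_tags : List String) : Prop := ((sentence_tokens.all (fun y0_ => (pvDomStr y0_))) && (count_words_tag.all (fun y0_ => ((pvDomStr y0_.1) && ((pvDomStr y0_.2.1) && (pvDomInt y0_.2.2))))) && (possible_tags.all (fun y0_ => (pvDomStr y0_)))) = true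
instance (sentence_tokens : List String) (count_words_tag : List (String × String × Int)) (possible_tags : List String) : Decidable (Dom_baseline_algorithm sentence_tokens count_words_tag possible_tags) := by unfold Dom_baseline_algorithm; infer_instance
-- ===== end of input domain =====

-- B replaces A's per-word scan over possible_tags by one indexing pass over the count table
-- plus O(1) lookups per token (same return value, proved below).

-- ===== PORT A =====
-- the dict argument (keyed by the (word, tag) pair) as a PySem.Dict
def pvCwtDict (count_words_tag : List (String × String × Int)) : PySem.Dict (String × String) Int :=
  PySem.Dict.ofList (count_words_tag.map (fun p => ((p.1, p.2.1), p.2.2)))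

def baseline_algorithm (sentence_tokens : List String) (count_words_tag : List (String × String × Int)) (possible_tags : List String) : List String :=
  let d := pvCwtDict count_words_tag
  sentence_tokens.foldl (fun tags word =>
    tags ++ [(possible_tags.foldl (fun (acc : String × Int) tag =>
        if d.getD (word, tag) 0 > acc.2 then (tag, d.getD (word, tag) 0) else acc)
      ("NOUN", (0 : Int))).1]) []

-- ===== PORT B =====
def baseline_algorithm_alt (sentence_tokens : List String) (count_words_tag : List (String × String × Int)) (possible_tags : List String) : List String :=
  let idx : PySem.Dict String Int :=
    (PySem.List.enumerate possible_tags).foldl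
      (fun d p => if d.contains p.2 then d else d.insert p.2 p.1) PySem.Dict.empty
  let d := pvCwtDict count_words_tag
  let best : PySem.Dict String (Int × Int × String) :=
    d.items.foldl (fun (b : PySem.Dict String (Int × Int × String)) (it : (String × String) × Int) =>
      match idx.get? it.1.2 with
      | none => b
      | some i =>
        if it.2 > 0 then
          match b.get? it.1.1 with
          | none => b.insert it.1.1 (it.2, i, it.1.2)
          | some cur =>
            if it.2 > cur.1 ∨ (it.2 = cur.1 ∧ i < cur.2.1) then b.insert it.1.1 (it.2, i, it.1.2) else b
        else b) PySem.Dict.empty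
  sentence_tokens.map (fun word =>
    match best.get? word with
    | some v => v.2.2
    | none => "NOUN")

-- ===== PRECONDITION & SPEC =====
def Spec_baseline_algorithm (sentence_tokens : List String) (count_words_tag : List (String × String × Int)) (possible_tags : List String) (out : List String) : Prop := out = baseline_algorithm_alt sentence_tokens count_words_tag possible_tags
instance (sentence_tokens : List String) (count_words_tag : List (String × String × Int)) (possible_tags : List String) (out : List String) : Decidable (Spec_baseline_algorithm sentence_tokens count_words_tag possible_tags out) := by unfold Spec_baseline_algorithm; infer_instance

-- ===== CLAIM (what is proved, stated in full; the proofs are below) =====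
def Claim_equal_baseline_algorithm : Prop := ∀ (sentence_tokens : List String) (count_words_tag : List (String × String × Int)) (possible_tags : List String), Dom_baseline_algorithm sentence_tokens count_words_tag possible_tags → Spec_baseline_algorithm sentence_tokens count_words_tag possible_tags (baseline_algorithm sentence_tokens count_words_tag possible_tags)

-- ===== LEMMAS AND PROOFS =====

-- the count a word/tag pair has in the table (0 if absent)
def pvCf (d : PySem.Dict (String × String) Int) (w t : String) : Int := d.getD (w, t) 0

-- the unique correct answer for one word: 'NOUN' if no tag has positive count,
-- else the tag at the least position carrying the maximal count
def pvBest (cf : String → Int) (pt : List String) (res : String) : Prop :=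
  ((∀ t ∈ pt, cf t ≤ 0) ∧ res = "NOUN") ∨
  (∃ (k : Nat) (h : k < pt.length), res = pt[k] ∧ 0 < cf pt[k] ∧
    (∀ j, (hj : j < pt.length) → cf pt[j] ≤ cf pt[k]) ∧
    (∀ j, (hj : j < pt.length) → cf pt[j] = cf pt[k] → k ≤ j))

theorem pvBest_unique (cf : String → Int) (pt : List String) (r1 r2 : String)
    (h1 : pvBest cf pt r1) (h2 : pvBest cf pt r2) : r1 = r2 := by
  rcases h1 with ⟨hle1, rfl⟩ | ⟨k1, hk1, rfl, hpos1, hmax1, hmin1⟩ <;>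
    rcases h2 with ⟨hle2, rfl⟩ | ⟨k2, hk2, rfl, hpos2, hmax2, hmin2⟩
  · rfl
  · exact absurd hpos2 (by have := hle1 _ (pt.getElem_mem hk2); omega)
  · exact absurd hpos1 (by have := hle2 _ (pt.getElem_mem hk1); omega)
  · have hc : cf pt[k1] = cf pt[k2] := le_antisymm (hmax2 k1 hk1) (hmax1 k2 hk2)
    have h12 := hmin1 k2 hk2 hc.symm
    have h21 := hmin2 k1 hk1 hc
    have : k1 = k2 := le_antisymm h12 h21
    simp [this]


-- B's per-word comparison step, abstracted over the running optimum for one word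
def pvStepW (idx : PySem.Dict String Int) (r : Option (Int × Int × String)) (x : String × Int) : Option (Int × Int × String) :=
  match idx.get? x.1 with
  | none => r
  | some i =>
    if x.2 > 0 then
      match r with
      | none => some (x.2, i, x.1)
      | some cur => if x.2 > cur.1 ∨ (x.2 = cur.1 ∧ i < cur.2.1) then some (x.2, i, x.1) else some cur
    else r

-- invariant of A's inner scan
def pvAstate (cf : String → Int) (pt : List String) (r : String × Int) : Prop :=
  (r.2 = 0 ∧ r.1 = "NOUN" ∧ ∀ t ∈ pt, cf t ≤ 0) ∨
  (0 < r.2 ∧ ∃ (k : Nat) (h : k < pt.length), r.1 = pt[k] ∧ cf pt[k] = r.2 ∧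
    (∀ j, (hj : j < pt.length) → cf pt[j] ≤ r.2) ∧
    (∀ j, (hj : j < pt.length) → cf pt[j] = r.2 → k ≤ j))

theorem pvA_char (cf : String → Int) (pt : List String) :
    pvAstate cf pt (pt.foldl (fun (acc : String × Int) tag =>
      if cf tag > acc.2 then (tag, cf tag) else acc) ("NOUN", (0 : Int))) := by
  induction pt using List.reverseRecOn with
  | nil => left; simp [pvAstate]
  | append_singleton pt t ih =>
    rw [List.foldl_append, List.foldl_cons, List.foldl_nil]
    set r := pt.foldl (fun (acc : String × Int) tag =>
      if cf tag > acc.2 then (tag, cf tag) else acc) ("NOUN", (0 : Int)) with hr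
    by_cases h : cf t > r.2
    · right
      simp only [if_pos h]
      have hr2 : (0:Int) ≤ r.2 := by
        rcases ih with ⟨h0, _⟩ | ⟨h0, _⟩ <;> omega
      refine ⟨by omega, pt.length, by simp, ?_, ?_, ?_, ?_⟩
      · simp
      · simp
      · intro j hj
        simp only [List.length_append, List.length_cons, List.length_nil] at hj
        by_cases hjl : j < pt.length
        · rw [List.getElem_append_left hjl]
          rcases ih with ⟨h0, _, hle⟩ | ⟨h0, k, hk, _, _, hle, _⟩
          · have := hle _ (pt.getElem_mem hjl); simp; omega
          · have := hle j hjl; simp; omega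
        · have : j = pt.length := by omega
          subst this
          simp
      · intro j hj heq
        simp only [List.length_append, List.length_cons, List.length_nil] at hj
        by_cases hjl : j < pt.length
        · exfalso
          rw [List.getElem_append_left hjl] at heq
          rcases ih with ⟨h0, _, hle⟩ | ⟨h0, k, hk, _, _, hle, _⟩
          · have := hle _ (pt.getElem_mem hjl); omega
          · have := hle j hjl; omega
        · omega
    · simp only [if_neg h]
      rcases ih with ⟨h0, h1, hle⟩ | ⟨h0, k, hk, hrk, hck, hle, hmin⟩
      · left
        refine ⟨h0, h1, ?_⟩
        intro t' ht'
        rcases List.mem_append.mp ht' with h' | h'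
        · exact hle _ h'
        · simp at h'; subst h'; omega
      · right
        refine ⟨h0, k, by simp; omega, ?_, ?_, ?_, ?_⟩
        · rw [List.getElem_append_left hk]; exact hrk
        · rw [List.getElem_append_left hk]; exact hck
        · intro j hj
          simp only [List.length_append, List.length_cons, List.length_nil] at hj
          by_cases hjl : j < pt.length
          · rw [List.getElem_append_left hjl]; exact hle j hjl
          · have : j = pt.length := by omega
            subst this
            simp; omega
        · intro j hj heq
          simp only [List.length_append, List.length_cons, List.length_nil] at hj
          by_cases hjl : j < pt.length
          · rw [List.getElem_append_left hjl] at heq; exact hmin j hjl heq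
          · omega

theorem pvA_best (cf : String → Int) (pt : List String) (r : String × Int)
    (h : pvAstate cf pt r) : pvBest cf pt r.1 := by
  rcases h with ⟨_, h1, hle⟩ | ⟨h0, k, hk, hrk, hck, hle, hmin⟩
  · exact Or.inl ⟨hle, h1⟩
  · right
    refine ⟨k, hk, hrk, by omega, ?_, ?_⟩
    · intro j hj; rw [hck]; exact hle j hj
    · intro j hj he; exact hmin j hj (by rw [← hck]; exact he)

-- characterization of the first-occurrence index map built by B
theorem pvIndex?_cons_ne (t t0 : String) (ts : List String) (h : t ≠ t0) :
    PySem.List.index? (t0 :: ts) t = (PySem.List.index? ts t).map (· + 1) := by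
  simp only [PySem.List.index?_eq_idxOf?]
  rw [List.idxOf?_cons]
  simp [beq_iff_eq, Ne.symm h]

theorem pvIdx_get (pt : List String) (s : Int) (d0 : PySem.Dict String Int) (t : String) :
    ((PySem.List.enumerate pt s).foldl
        (fun d p => if d.contains p.2 then d else d.insert p.2 p.1) d0).get? t
      = (d0.get? t).or ((PySem.List.index? pt t).map (fun k => s + (k : Int))) := by
  induction pt generalizing s d0 with
  | nil =>
    simp [PySem.List.enumerate_nil, PySem.List.index?_eq_idxOf?]
  | cons t0 ts ih =>
    rw [PySem.List.enumerate_cons, List.foldl_cons]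
    simp only []
    by_cases hc : d0.contains t0
    · rw [if_pos hc, ih]
      by_cases ht : t = t0
      · subst ht
        have : (d0.get? t).isSome := by
          rw [← PySem.Dict.contains_eq_isSome_get?]; exact hc
        obtain ⟨v, hv⟩ := Option.isSome_iff_exists.mp this
        simp [hv]
      · rw [pvIndex?_cons_ne t t0 ts ht]
        cases hix : PySem.List.index? ts t <;> simp [hix] <;> ring_nf
    · rw [if_neg hc]
      rw [ih]
      have hd0 : d0.get? t0 = none := by
        rw [PySem.Dict.contains_eq_isSome_get?] at hc
        exact Option.not_isSome_iff_eq_none.mp (by simp [hc])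
      by_cases ht : t = t0
      · subst ht
        rw [PySem.Dict.get?_insert_self, hd0, PySem.List.index?_cons_self]
        simp
      · rw [PySem.Dict.get?_insert_of_ne d0 s ht]
        rw [pvIndex?_cons_ne t t0 ts ht]
        cases hix : PySem.List.index? ts t <;> simp [hix] <;> ring_nf

-- per-word projection of B's single pass over the table
theorem pvGetFoldB (idx : PySem.Dict String Int) (l : List ((String × String) × Int))
    (b : PySem.Dict String (Int × Int × String)) (w : String) :
    (l.foldl (fun (b : PySem.Dict String (Int × Int × String)) (it : (String × String) × Int) =>
      match idx.get? it.1.2 with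
      | none => b
      | some i =>
        if it.2 > 0 then
          match b.get? it.1.1 with
          | none => b.insert it.1.1 (it.2, i, it.1.2)
          | some cur =>
            if it.2 > cur.1 ∨ (it.2 = cur.1 ∧ i < cur.2.1) then b.insert it.1.1 (it.2, i, it.1.2) else b
        else b) b).get? w
    = (l.filterMap (fun it => if it.1.1 = w then some (it.1.2, it.2) else none)).foldl
        (pvStepW idx) (b.get? w) := by
  induction l generalizing b with
  | nil => simp
  | cons it l ih =>
    obtain ⟨⟨iw, itag⟩, c⟩ := it
    rw [List.foldl_cons, List.filterMap_cons]
    by_cases hw : iw = w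
    · subst hw
      simp only [reduceIte]
      rw [List.foldl_cons, ih]
      congr 1
      show _ = pvStepW idx (b.get? iw) (itag, c)
      cases hi : idx.get? itag with
      | none => simp [pvStepW, hi]
      | some i =>
        by_cases hpos : c > 0
        · cases hb : b.get? iw with
          | none =>
            simp only [hi, if_pos hpos, hb]
            rw [PySem.Dict.get?_insert_self]
            simp [pvStepW, hi, hpos, hb]
          | some cur =>
            by_cases hbet : c > cur.1 ∨ (c = cur.1 ∧ i < cur.2.1)
            · simp only [hi, if_pos hpos, hb, if_pos hbet]
              rw [PySem.Dict.get?_insert_self]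
              simp [pvStepW, hi, hpos, hb, hbet]
            · simp only [hi, if_pos hpos, hb, if_neg hbet]
              simp [pvStepW, hi, hpos, hb, hbet]
        · simp only [hi, if_neg hpos]
          simp [pvStepW, hi, hpos]
    · have hw' : w ≠ iw := Ne.symm hw
      simp only [if_neg hw]
      rw [ih]
      congr 1
      cases hi : idx.get? itag with
      | none => rfl
      | some i =>
        by_cases hpos : c > 0
        · cases hb : b.get? iw with
          | none =>
            simp only [hi, if_pos hpos, hb]
            exact PySem.Dict.get?_insert_of_ne b _ hw'
          | some cur =>
            by_cases hbet : c > cur.1 ∨ (c = cur.1 ∧ i < cur.2.1)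
            · simp only [hi, if_pos hpos, hb, if_pos hbet]
              exact PySem.Dict.get?_insert_of_ne b _ hw'
            · simp only [hi, if_pos hpos, hb, if_neg hbet]
        · simp only [hi, if_neg hpos]

-- what the per-word fold computes: the valid candidate with maximal count, least index on ties
def pvWok (idx : PySem.Dict String Int) (pairs : List (String × Int)) (r : Option (Int × Int × String)) : Prop :=
  match r with
  | none => ∀ x ∈ pairs, ∀ i, idx.get? x.1 = some i → x.2 ≤ 0
  | some z => 0 < z.1 ∧ idx.get? z.2.2 = some z.2.1 ∧ (z.2.2, z.1) ∈ pairs ∧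
      ∀ x ∈ pairs, ∀ i', idx.get? x.1 = some i' → 0 < x.2 → (x.2 < z.1 ∨ (x.2 = z.1 ∧ z.2.1 ≤ i'))

theorem pvW_char (idx : PySem.Dict String Int) (pairs : List (String × Int)) :
    pvWok idx pairs (pairs.foldl (pvStepW idx) none) := by
  induction pairs using List.reverseRecOn with
  | nil => intro x hx; simp at hx
  | append_singleton pairs x ih =>
    rw [List.foldl_append, List.foldl_cons, List.foldl_nil]
    rcases hro : pairs.foldl (pvStepW idx) none with _ | z <;> rw [hro] at ih
    · -- r = none
      unfold pvStepW
      cases hi : idx.get? x.1 with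
      | none =>
        dsimp only
        intro y hy i hyi
        rcases List.mem_append.mp hy with h | h
        · exact ih y h i hyi
        · simp at h; subst h; rw [hi] at hyi; exact absurd hyi (by simp)
      | some i =>
        dsimp only
        by_cases hpos : x.2 > 0
        · rw [if_pos hpos]
          refine ⟨hpos, by simpa using hi, by simp, ?_⟩
          intro y hy i' hyi hp
          rcases List.mem_append.mp hy with h | h
          · exact absurd hp (by have := ih y h i' hyi; omega)
          · simp at h; subst h
            rw [hi] at hyi
            have hii : i = i' := by simpa using hyi
            subst hii
            exact Or.inr ⟨rfl, le_refl i⟩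
        · rw [if_neg hpos]
          intro y hy i' hyi
          rcases List.mem_append.mp hy with h | h
          · exact ih y h i' hyi
          · simp at h; subst h; omega
    · -- r = some z
      obtain ⟨h1, h2, h3, h4⟩ := ih
      unfold pvStepW
      cases hi : idx.get? x.1 with
      | none =>
        dsimp only
        refine ⟨h1, h2, List.mem_append_left _ h3, ?_⟩
        intro y hy i' hyi hp
        rcases List.mem_append.mp hy with h | h
        · exact h4 y h i' hyi hp
        · simp at h; subst h; rw [hi] at hyi; exact absurd hyi (by simp)
      | some i =>
        dsimp only
        by_cases hpos : x.2 > 0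
        · rw [if_pos hpos]
          by_cases hbet : x.2 > z.1 ∨ (x.2 = z.1 ∧ i < z.2.1)
          · rw [if_pos hbet]
            refine ⟨hpos, by simpa using hi, by simp, ?_⟩
            intro y hy i' hyi hp
            rcases List.mem_append.mp hy with h | h
            · have := h4 y h i' hyi hp
              dsimp only
              omega
            · simp at h; subst h
              rw [hi] at hyi
              have hii : i = i' := by simpa using hyi
              subst hii
              exact Or.inr ⟨rfl, le_refl i⟩
          · rw [if_neg hbet]
            push_neg at hbet
            refine ⟨h1, h2, List.mem_append_left _ h3, ?_⟩
            intro y hy i' hyi hp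
            rcases List.mem_append.mp hy with h | h
            · exact h4 y h i' hyi hp
            · simp at h; subst h
              rw [hi] at hyi
              have hii : i = i' := by simpa using hyi
              subst hii
              omega
        · rw [if_neg hpos]
          refine ⟨h1, h2, List.mem_append_left _ h3, ?_⟩
          intro y hy i' hyi hp
          rcases List.mem_append.mp hy with h | h
          · exact h4 y h i' hyi hp
          · simp at h; subst h; omega

-- facts about index?
theorem pvIndex?_spec (pt : List String) (t : String) (k : Nat)
    (h : PySem.List.index? pt t = some k) :
    ∃ (hk : k < pt.length), pt[k] = t ∧ ∀ j, (hj : j < pt.length) → pt[j] = t → k ≤ j := by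
  rw [PySem.List.index?_eq_some_iff] at h
  obtain ⟨pre, suf, hpt, hlen, hnm⟩ := h
  subst hpt hlen
  have hk : pre.length < (pre ++ t :: suf).length := by simp
  refine ⟨hk, ?_, ?_⟩
  · rw [List.getElem_append_right (le_refl _)]
    simp
  · intro j hj hjt
    by_contra hlt
    push_neg at hlt
    rw [List.getElem_append_left hlt] at hjt
    exact hnm (hjt ▸ List.getElem_mem hlt)

-- B's answer for one word is the unique best tag
theorem pvB_best (cwt : List (String × String × Int)) (pt : List String) (w : String) :
    pvBest (pvCf (pvCwtDict cwt) w) pt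
      (match ((pvCwtDict cwt).items.foldl
          (fun (b : PySem.Dict String (Int × Int × String)) (it : (String × String) × Int) =>
            match ((PySem.List.enumerate pt).foldl
                (fun d p => if d.contains p.2 then d else d.insert p.2 p.1) PySem.Dict.empty).get? it.1.2 with
            | none => b
            | some i =>
              if it.2 > 0 then
                match b.get? it.1.1 with
                | none => b.insert it.1.1 (it.2, i, it.1.2)
                | some cur =>
                  if it.2 > cur.1 ∨ (it.2 = cur.1 ∧ i < cur.2.1) then b.insert it.1.1 (it.2, i, it.1.2) else b
              else b) PySem.Dict.empty).get? w with
        | some v => v.2.2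
        | none => "NOUN") := by
  have hnd : (pvCwtDict cwt).keys.Nodup := PySem.Dict.nodup_keys_ofList _
  set d := pvCwtDict cwt with hd
  set idx : PySem.Dict String Int :=
    (PySem.List.enumerate pt).foldl
      (fun d p => if d.contains p.2 then d else d.insert p.2 p.1) PySem.Dict.empty with hIdx
  have hidx : ∀ t : String, idx.get? t = (PySem.List.index? pt t).map (fun k => (k : Int)) := by
    intro t
    rw [hIdx, pvIdx_get, PySem.Dict.get?_empty, Option.none_or]
    cases hix : PySem.List.index? pt t <;> simp
  rw [pvGetFoldB idx d.items PySem.Dict.empty w, PySem.Dict.get?_empty]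
  set pairs := d.items.filterMap (fun it => if it.1.1 = w then some (it.1.2, it.2) else none) with hpairs
  have hmem : ∀ t c, (t, c) ∈ pairs ↔ ((w, t), c) ∈ d.items := by
    intro t c
    rw [hpairs]
    simp only [List.mem_filterMap]
    constructor
    · rintro ⟨⟨⟨iw, itag⟩, cc⟩, hin, heq⟩
      by_cases h : iw = w
      · subst h
        simp only [if_pos rfl, Option.some.injEq, Prod.mk.injEq] at heq
        obtain ⟨rfl, rfl⟩ := heq
        exact hin
      · simp [h] at heq
    · intro hin; exact ⟨((w, t), c), hin, by simp⟩
  have hcf_mem : ∀ t c, ((w, t), c) ∈ d.items → pvCf d w t = c := by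
    intro t c h
    exact PySem.Dict.getD_of_mem_items d h hnd 0
  have hcf_pos : ∀ t : String, 0 < pvCf d w t → ((w, t), pvCf d w t) ∈ d.items := by
    intro t hpos
    cases hg : d.get? (w, t) with
    | none =>
      exfalso
      unfold pvCf at hpos
      rw [PySem.Dict.getD_eq_get?_getD, hg] at hpos
      simp at hpos
    | some c =>
      have hc : pvCf d w t = c := by
        unfold pvCf
        rw [PySem.Dict.getD_eq_get?_getD, hg]
        rfl
      rw [hc]
      exact PySem.Dict.mem_items_of_get?_eq_some d hg
  have hW := pvW_char idx pairs
  rcases hro : pairs.foldl (pvStepW idx) none with _ | z <;> rw [hro] at hW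
  · left
    refine ⟨?_, rfl⟩
    intro t ht
    by_contra hgt
    push_neg at hgt
    have hmemt := hcf_pos t (by omega)
    have hp : (t, pvCf d w t) ∈ pairs := (hmem _ _).mpr hmemt
    obtain ⟨k, hk⟩ := Option.isSome_iff_exists.mp ((PySem.List.index?_isSome_iff pt t).mpr ht)
    have h5 : pvCf d w t ≤ 0 := hW (t, pvCf d w t) hp (k : Int) (by rw [hidx t, hk]; rfl)
    omega
  · obtain ⟨h1, h2, h3, h4⟩ := hW
    rw [hidx z.2.2] at h2
    cases hk0 : PySem.List.index? pt z.2.2 with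
    | none => rw [hk0] at h2; simp at h2
    | some k0 =>
      rw [hk0] at h2
      have h2' : (k0 : Int) = z.2.1 := by simpa using h2
      obtain ⟨hklt, hptk, hkmin⟩ := pvIndex?_spec pt z.2.2 k0 hk0
      have hcfz : pvCf d w z.2.2 = z.1 := hcf_mem _ _ ((hmem _ _).mp h3)
      right
      refine ⟨k0, hklt, hptk.symm, ?_, ?_, ?_⟩
      · rw [hptk, hcfz]; exact h1
      · intro j hj
        rw [hptk, hcfz]
        by_cases hpos : 0 < pvCf d w pt[j]
        · have hp : (pt[j], pvCf d w pt[j]) ∈ pairs := (hmem _ _).mpr (hcf_pos _ hpos)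
          obtain ⟨k', hk'⟩ := Option.isSome_iff_exists.mp
            ((PySem.List.index?_isSome_iff pt pt[j]).mpr (List.getElem_mem hj))
          have h5 : pvCf d w pt[j] < z.1 ∨ (pvCf d w pt[j] = z.1 ∧ z.2.1 ≤ (k' : Int)) :=
            h4 (pt[j], pvCf d w pt[j]) hp (k' : Int) (by rw [hidx, hk']; rfl) hpos
          omega
        · omega
      · intro j hj he
        rw [hptk] at he
        rw [hcfz] at he
        have hpos : 0 < pvCf d w pt[j] := by omega
        have hp : (pt[j], pvCf d w pt[j]) ∈ pairs := (hmem _ _).mpr (hcf_pos _ hpos)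
        obtain ⟨k', hk'⟩ := Option.isSome_iff_exists.mp
          ((PySem.List.index?_isSome_iff pt pt[j]).mpr (List.getElem_mem hj))
        have hcmp : pvCf d w pt[j] < z.1 ∨ (pvCf d w pt[j] = z.1 ∧ z.2.1 ≤ (k' : Int)) :=
          h4 (pt[j], pvCf d w pt[j]) hp (k' : Int) (by rw [hidx, hk']; rfl) hpos
        obtain ⟨hk'lt, hptk', hk'min⟩ := pvIndex?_spec pt pt[j] k' hk'
        have hk'j : k' ≤ j := hk'min j hj rfl
        have : (k0 : Int) ≤ (k' : Int) := by
          rcases hcmp with h | ⟨_, hle⟩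
          · omega
          · rw [h2']; exact hle
        have : k0 ≤ k' := by exact_mod_cast this
        omega

-- ===== VERDICT (by name: the statement is the Claim_ definition above) =====
theorem baseline_algorithm_spec : Claim_equal_baseline_algorithm := by
  intro st cwt pt _
  unfold Spec_baseline_algorithm baseline_algorithm baseline_algorithm_alt
  rw [PySem.List.foldl_append_singleton_eq_map]
  refine List.map_congr_left (fun w _ => ?_)
  exact pvBest_unique (pvCf (pvCwtDict cwt) w) pt _ _
    (pvA_best _ _ _ (pvA_char (pvCf (pvCwtDict cwt) w) pt)) (pvB_best cwt pt w)
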